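-- pv_equiv track=rewrite | github.com/DevMatei/listenbrainz-wrapped | wrapped-fm.py | _select_lastfm_image
-- ===== SOURCE A (Python) =====
-- from typing import Dict, Iterable, List, Optional, Tuple
--
-- LASTFM_PLACEHOLDER_HASHES = {"2a96cbd8b46e442fc41c2b86b821562f"}
--
-- def _is_lastfm_placeholder(url: str) -> bool:
--     lowered = url.lower()
--     return any(placeholder in lowered for placeholder in LASTFM_PLACEHOLDER_HASHES)
--
-- def _select_lastfm_image(images: List[Dict]) -> Optional[str]:
--     if not images:
--         return None
--     size_order = {"mega": 6, "extralarge": 5, "large": 4, "medium": 3, "small": 2}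
--     candidates: List[Tuple[int, str]] = []
--     for image in images:
--         url = image.get("#text", "")
--         if not url or _is_lastfm_placeholder(url):
--             continue
--         size_rank = size_order.get(image.get("size", "").lower(), 0)
--         candidates.append((size_rank, url))
--     if not candidates:
--         return None
--     candidates.sort(key=lambda item: item[0], reverse=True)
--     return candidates[0][1]
-- ===== SOURCE B (Python) =====
-- from typing import Dict, List, Optional
--
-- LASTFM_PLACEHOLDER_HASHES = {"2a96cbd8b46e442fc41c2b86b821562f"}
--
-- def _select_lastfm_image(images: List[Dict]) -> Optional[str]:
--     size_order = {"mega": 6, "extralarge": 5, "large": 4, "medium": 3, "small": 2}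
--     best_rank = -1
--     best_url = None
--     for image in images:
--         url = image.get("#text", "")
--         if not url or any(h in url.lower() for h in LASTFM_PLACEHOLDER_HASHES):
--             continue
--         rank = size_order.get(image.get("size", "").lower(), 0)
--         if rank > best_rank:
--             best_rank = rank
--             best_url = url
--     return best_url
-- ===== Notes on version B (the rewrite author's own statement) =====
-- stated objective: simpler
-- what changed: Replaces the candidate-list build plus stable reverse sort with a single pass that tracks the best (rank, url) seen so far, using strict '>' to keep the first occurrence among equal ranks.
import Mathlib
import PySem

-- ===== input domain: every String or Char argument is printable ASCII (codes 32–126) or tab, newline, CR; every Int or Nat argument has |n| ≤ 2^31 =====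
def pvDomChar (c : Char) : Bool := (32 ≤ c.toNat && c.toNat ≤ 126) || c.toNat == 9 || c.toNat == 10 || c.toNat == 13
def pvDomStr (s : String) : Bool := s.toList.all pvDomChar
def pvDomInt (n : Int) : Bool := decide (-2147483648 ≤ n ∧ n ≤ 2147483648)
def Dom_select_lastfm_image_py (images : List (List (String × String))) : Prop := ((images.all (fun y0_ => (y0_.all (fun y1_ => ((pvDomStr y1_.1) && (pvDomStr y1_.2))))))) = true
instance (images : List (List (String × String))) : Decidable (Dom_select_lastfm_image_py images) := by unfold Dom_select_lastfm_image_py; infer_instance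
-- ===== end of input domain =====

-- B replaces A's candidate-list build + stable reverse sort with a single best-so-far pass (objective: simpler).

-- ===== PORT A =====
-- LASTFM_PLACEHOLDER_HASHES
def pvPlaceholderHashes : PySem.Set String := PySem.Set.ofList ["2a96cbd8b46e442fc41c2b86b821562f"]

-- _is_lastfm_placeholder
def pvIsLastfmPlaceholder (url : String) : Bool :=
  let lowered := PySem.Str.lower url
  pvPlaceholderHashes.any (fun placeholder => PySem.Str.isIn placeholder lowered)

def pvSizeOrder : PySem.Dict String Int :=
  PySem.Dict.ofList [("mega", 6), ("extralarge", 5), ("large", 4), ("medium", 3), ("small", 2)]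

def select_lastfm_image_py (images : List (List (String × String))) : Option String :=
  if images = [] then none
  else
    let candidates : List (Int × String) :=
      images.foldl (fun acc image =>
        let url := (PySem.Dict.mk image).getD "#text" ""
        if url = "" || pvIsLastfmPlaceholder url then acc
        else
          let size_rank := pvSizeOrder.getD (PySem.Str.lower ((PySem.Dict.mk image).getD "size" "")) 0
          acc ++ [(size_rank, url)]) []
    if candidates = [] then none
    else ((PySem.List.sorted candidates (fun item => item.1) true).head?.map (fun item => item.2))

-- ===== PORT B =====
def select_lastfm_image_py_alt (images : List (List (String × String))) : Option String :=
  (images.foldl (fun (st : Int × Option String) image =>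
      let url := (PySem.Dict.mk image).getD "#text" ""
      if url = "" || PySem.Str.isIn "2a96cbd8b46e442fc41c2b86b821562f" (PySem.Str.lower url) then st
      else
        let rank := pvSizeOrder.getD (PySem.Str.lower ((PySem.Dict.mk image).getD "size" "")) 0
        if st.1 < rank then (rank, some url) else st)
    (-1, none)).2

-- ===== PRECONDITION & SPEC =====
def Spec_select_lastfm_image_py (images : List (List (String × String))) (out : Option String) : Prop := out = select_lastfm_image_py_alt images
instance (images : List (List (String × String))) (out : Option String) : Decidable (Spec_select_lastfm_image_py images out) := by unfold Spec_select_lastfm_image_py; infer_instance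

-- ===== CLAIM (what is proved, stated in full; the proofs are below) =====
def Claim_equal_select_lastfm_image_py : Prop := ∀ (images : List (List (String × String))), Dom_select_lastfm_image_py images → Spec_select_lastfm_image_py images (select_lastfm_image_py images)

-- ===== LEMMAS AND PROOFS =====

-- the shared per-image candidate: none if skipped, some (rank, url) otherwise
def pvCand (image : List (String × String)) : Option (Int × String) :=
  let url := (PySem.Dict.mk image).getD "#text" ""
  if url = "" || pvIsLastfmPlaceholder url then none
  else some (pvSizeOrder.getD (PySem.Str.lower ((PySem.Dict.mk image).getD "size" "")) 0, url)

lemma pv_placeholder_eq (url : String) :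
    pvIsLastfmPlaceholder url = PySem.Str.isIn "2a96cbd8b46e442fc41c2b86b821562f" (PySem.Str.lower url) := by
  simp [pvIsLastfmPlaceholder, pvPlaceholderHashes, PySem.Set.ofList, PySem.Set.add, PySem.Set.empty, List.any]

lemma pv_sizeOrder_nonneg (k : String) : 0 ≤ pvSizeOrder.getD k 0 := by
  rw [PySem.Dict.getD_eq_get?_getD]
  cases h : pvSizeOrder.get? k with
  | none => simp
  | some v =>
    have hv := PySem.Dict.mem_items_of_get?_eq_some _ h
    have : v = 6 ∨ v = 5 ∨ v = 4 ∨ v = 3 ∨ v = 2 := by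
      have : pvSizeOrder.items = [("mega", (6:Int)), ("extralarge", 5), ("large", 4), ("medium", 3), ("small", 2)] := by decide
      rw [this] at hv
      simp at hv
      rcases hv with ⟨_, h⟩ | ⟨_, h⟩ | ⟨_, h⟩ | ⟨_, h⟩ | ⟨_, h⟩ <;> simp [h]
    rcases this with h | h | h | h | h <;> simp [h]

lemma pv_candA (images : List (List (String × String))) (acc : List (Int × String)) :
    images.foldl (fun acc image =>
        let url := (PySem.Dict.mk image).getD "#text" ""
        if url = "" || pvIsLastfmPlaceholder url then acc
        else
          let size_rank := pvSizeOrder.getD (PySem.Str.lower ((PySem.Dict.mk image).getD "size" "")) 0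
          acc ++ [(size_rank, url)]) acc
      = acc ++ images.filterMap pvCand := by
  induction images generalizing acc with
  | nil => simp
  | cons img rest ih =>
    simp only [List.foldl_cons, List.filterMap_cons]
    by_cases h : ((PySem.Dict.mk img).getD "#text" "" = "" || pvIsLastfmPlaceholder ((PySem.Dict.mk img).getD "#text" ""))
    · simp only [pvCand, h, if_pos]
      rw [ih]
      simp [pvCand]
    · rw [ih]
      simp [pvCand, h]

def pvBestStep (st : Int × Option String) (c : Int × String) : Int × Option String :=
  if st.1 < c.1 then (c.1, some c.2) else st

lemma pv_candB (images : List (List (String × String))) (st : Int × Option String) :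
    images.foldl (fun (st : Int × Option String) image =>
        let url := (PySem.Dict.mk image).getD "#text" ""
        if url = "" || PySem.Str.isIn "2a96cbd8b46e442fc41c2b86b821562f" (PySem.Str.lower url) then st
        else
          let rank := pvSizeOrder.getD (PySem.Str.lower ((PySem.Dict.mk image).getD "size" "")) 0
          if st.1 < rank then (rank, some url) else st) st
      = (images.filterMap pvCand).foldl pvBestStep st := by
  induction images generalizing st with
  | nil => simp
  | cons img rest ih =>
    simp only [List.foldl_cons, List.filterMap_cons]
    rw [← pv_placeholder_eq]
    by_cases h : ((PySem.Dict.mk img).getD "#text" "" = "" || pvIsLastfmPlaceholder ((PySem.Dict.mk img).getD "#text" ""))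
    · have hskip : pvCand img = none := by simp [pvCand, h]
      simp only [hskip, h, if_true]
      exact ih st
    · simp only [Bool.not_eq_true] at h
      have hkeep : pvCand img =
          some (pvSizeOrder.getD (PySem.Str.lower ((PySem.Dict.mk img).getD "size" "")) 0,
                (PySem.Dict.mk img).getD "#text" "") := by simp [pvCand, h]
      simp only [hkeep, h, Bool.false_eq_true, if_false, List.foldl_cons]
      rw [ih]
      simp [pvBestStep]

def pvInsStep (acc : List (Int × String)) (c : Int × String) : List (Int × String) :=
  PySem.List.insertBy (fun a b => decide ((fun item : Int × String => item.1) b < (fun item : Int × String => item.1) a)) c acc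

lemma pv_head_insertBy (acc : List (Int × String)) (c : Int × String) :
    (pvInsStep acc c).head? = match acc.head? with
      | none => some c
      | some d => if d.1 < c.1 then some c else some d := by
  cases acc with
  | nil => simp [pvInsStep, PySem.List.insertBy]
  | cons d t =>
    by_cases h : d.1 < c.1 <;> simp [pvInsStep, PySem.List.insertBy, h]

lemma pv_main (cs : List (Int × String)) (acc : List (Int × String)) (st : Int × Option String)
    (hpos : ∀ c ∈ cs, 0 ≤ c.1)
    (hinv : st = match acc.head? with | none => ((-1 : Int), none) | some d => (d.1, some d.2)) :
    (cs.foldl pvBestStep st).2 = ((cs.foldl pvInsStep acc).head?).map (fun item => item.2) := by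
  induction cs generalizing acc st with
  | nil =>
    subst hinv
    cases h : acc.head? <;> simp [h]
  | cons c rest ih =>
    simp only [List.foldl_cons]
    apply ih
    · intro x hx; exact hpos x (List.mem_cons_of_mem _ hx)
    · subst hinv
      rw [pv_head_insertBy]
      have hc : 0 ≤ c.1 := hpos c (List.mem_cons_self)
      cases h : acc.head? with
      | none => simp [pvBestStep, show (-1 : Int) < c.1 by omega]
      | some d =>
        by_cases hlt : d.1 < c.1 <;> simp [pvBestStep, hlt]

lemma pv_sorted_head (cs : List (Int × String)) (hpos : ∀ c ∈ cs, 0 ≤ c.1) :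
    (cs.foldl pvBestStep (-1, none)).2
      = ((PySem.List.sorted cs (fun item => item.1) true).head?).map (fun item => item.2) := by
  rw [PySem.List.sorted_rev_eq_foldl_insertBy]
  exact pv_main cs [] (-1, none) hpos rfl

-- ===== VERDICT (by name: the statement is the Claim_ definition above) =====
theorem select_lastfm_image_py_spec : Claim_equal_select_lastfm_image_py := by
  intro images _
  unfold Spec_select_lastfm_image_py select_lastfm_image_py select_lastfm_image_py_alt
  rw [pv_candB, pv_sorted_head _ (by
    intro c hc
    rcases List.mem_filterMap.mp hc with ⟨img, _, hcand⟩
    have h0 := pv_sizeOrder_nonneg (PySem.Str.lower ((PySem.Dict.mk img).getD "size" ""))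
    by_cases hb : ((PySem.Dict.mk img).getD "#text" "" = "" || pvIsLastfmPlaceholder ((PySem.Dict.mk img).getD "#text" ""))
    · simp [pvCand, hb] at hcand
    · simp [pvCand, hb] at hcand
      rcases hcand with ⟨h1, h2⟩
      omega)]
  by_cases himg : images = []
  · simp [himg, PySem.List.sorted_eq_nil_iff]
  · simp only [himg, if_false]
    rw [pv_candA]
    simp only [List.nil_append]
    by_cases hcs : images.filterMap pvCand = []
    · simp [hcs, PySem.List.sorted]
    · simp [hcs]
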